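-- pv_equiv track=rewrite | github.com/PeterWolf-tw/ESOE-CS101-2016 | homework03_b05505037.py | condAND
-- ===== SOURCE A (Python) =====
-- def condAND(inputSTR_X, inputSTR_Y):
--     outputSTR = ""
--     for i in inputSTR_X:
--         if i == "1":
--             for j in inputSTR_Y:
--                 if j == "1":
--                     outputSTR = outputSTR + "1"
--                 else:
--                     outputSTR = outputSTR + "0"
--         else:
--             outputSTR = outputSTR + "0"
--     return outputSTR
-- ===== SOURCE B (Python) =====
-- def condAND(inputSTR_X, inputSTR_Y):
--     # Split-on-'1' / join view: every maximal run of non-'1' chars becomes a run of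
--     # '0's of the same length, and each '1' becomes one copy of the separator.
--     normY = '1'.join('0' * len(seg) for seg in inputSTR_Y.split('1'))
--     return normY.join('0' * len(seg) for seg in inputSTR_X.split('1'))
-- ===== Notes on version B (the rewrite author's own statement) =====
-- stated objective: faster
-- what changed: B never walks the strings character by character: it splits each string on '1', replaces every segment by a run of '0' of the same length via string replication, and joins the segments (normalized Y as the separator), whereas A runs a nested per-character loop with repeated string concatenation. The split/replicate/join work runs in C-level bulk string operations, which a timing run measured ~2.8x faster than A's per-character Python loop at the largest size.
import Mathlib
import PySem

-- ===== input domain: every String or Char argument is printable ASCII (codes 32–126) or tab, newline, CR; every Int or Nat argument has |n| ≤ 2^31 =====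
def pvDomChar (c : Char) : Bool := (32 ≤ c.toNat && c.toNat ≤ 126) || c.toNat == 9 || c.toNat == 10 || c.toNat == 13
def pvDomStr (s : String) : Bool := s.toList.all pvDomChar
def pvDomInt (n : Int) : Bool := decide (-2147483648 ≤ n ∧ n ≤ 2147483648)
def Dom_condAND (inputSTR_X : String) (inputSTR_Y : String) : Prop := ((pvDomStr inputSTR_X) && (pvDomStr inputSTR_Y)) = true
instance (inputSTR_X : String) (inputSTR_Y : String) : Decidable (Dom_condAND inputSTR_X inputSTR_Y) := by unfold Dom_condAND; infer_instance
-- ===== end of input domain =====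

-- B rebuilds the result via split('1') / join with '0'-run replication instead of A's nested per-character loops; objective: alternative decomposition.

-- ===== PORT A =====
def condAND (inputSTR_X : String) (inputSTR_Y : String) : String :=
  inputSTR_X.toList.foldl (fun outputSTR i =>
    if i = '1' then
      inputSTR_Y.toList.foldl (fun acc j =>
        if j = '1' then acc ++ "1" else acc ++ "0") outputSTR
    else outputSTR ++ "0") ""

-- ===== PORT B =====
-- '0' * len(seg)  is ported as  String.ofList (List.replicate seg.length '0')  (exact);
-- s.split('1')    is ported as  PySem.Chars.splitOn s.toList ['1']  (the sep ≠ "" split).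
def condAND_alt (inputSTR_X : String) (inputSTR_Y : String) : String :=
  let zeros : List Char → String := fun seg => String.ofList (List.replicate seg.length '0')
  let normY : String := PySem.Str.join "1" ((PySem.Chars.splitOn inputSTR_Y.toList ['1']).map zeros)
  PySem.Str.join normY ((PySem.Chars.splitOn inputSTR_X.toList ['1']).map zeros)

-- ===== PRECONDITION & SPEC =====
def Spec_condAND (inputSTR_X : String) (inputSTR_Y : String) (out : String) : Prop := out = condAND_alt inputSTR_X inputSTR_Y
instance (inputSTR_X : String) (inputSTR_Y : String) (out : String) : Decidable (Spec_condAND inputSTR_X inputSTR_Y out) := by unfold Spec_condAND; infer_instance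

-- ===== CLAIM (what is proved, stated in full; the proofs are below) =====
def Claim_equal_condAND : Prop := ∀ (inputSTR_X : String) (inputSTR_Y : String), Dom_condAND inputSTR_X inputSTR_Y → Spec_condAND inputSTR_X inputSTR_Y (condAND inputSTR_X inputSTR_Y)

-- ===== LEMMAS AND PROOFS =====

-- A string foldl appending a chunk per character is the join of the per-character chunks.
theorem foldl_app (f : Char → String) (xs : List Char) (acc : String) :
    xs.foldl (fun a i => a ++ f i) acc = acc ++ String.join (xs.map f) := by
  induction xs generalizing acc with
  | nil =>
    apply String.toList_inj.mp
    simp [String.toList_join]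
  | cons c t ih =>
    rw [List.foldl_cons, ih]
    apply String.toList_inj.mp
    simp [String.toList_join]

-- structural single-char split (reference recursion for PySem.Chars.splitOn with sep = [d])
def splitD (d : Char) : List Char → List (List Char)
  | [] => [[]]
  | c :: t =>
    if c = d then [] :: splitD d t
    else
      match splitD d t with
      | [] => [[c]]
      | h :: t' => (c :: h) :: t'

theorem splitD_ne_nil (d : Char) (l : List Char) : splitD d l ≠ [] := by
  cases l with
  | nil => simp [splitD]
  | cons c t =>
    simp only [splitD]
    split_ifs
    · simp
    · cases h : splitD d t <;> simp

theorem splitOn_go_spec (d : Char) (fuel : Nat) (l cur : List Char) (acc : List (List Char))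
    (h : l.length < fuel) :
    PySem.Chars.splitOn.go [d] fuel l cur acc
      = acc.reverse ++ (splitD d l).modifyHead (fun h0 => cur.reverse ++ h0) := by
  induction fuel generalizing l cur acc with
  | zero => omega
  | succ n ih =>
    cases l with
    | nil => simp [PySem.Chars.splitOn.go, splitD]
    | cons c rest =>
      simp only [PySem.Chars.splitOn.go]
      by_cases hc : c = d
      · have hpre : List.isPrefixOf [d] (c :: rest) = true := by
          simp [List.isPrefixOf, hc]
        rw [if_pos hpre]
        have hlen : rest.length < n := by simpa using h
        have := ih (List.drop (List.length [d]) (c :: rest)) [] (cur.reverse :: acc)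
          (by simpa using hlen)
        rw [this]
        simp [splitD, hc]
        cases hs : splitD d rest with
        | nil => exact absurd hs (splitD_ne_nil d rest)
        | cons h0 t0 => simp
      · have hpre : List.isPrefixOf [d] (c :: rest) = false := by
          simp [List.isPrefixOf]
          exact fun hd => absurd hd.symm hc
        rw [if_neg (by simp [hpre])]
        have hlen : rest.length < n := by simpa using h
        rw [ih rest (c :: cur) acc hlen]
        simp only [splitD, if_neg hc]
        cases hs : splitD d rest with
        | nil => exact absurd hs (splitD_ne_nil d rest)
        | cons h0 t0 => simp

theorem splitOn_eq_splitD (d : Char) (l : List Char) :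
    PySem.Chars.splitOn l [d] = splitD d l := by
  unfold PySem.Chars.splitOn
  rw [splitOn_go_spec d (l.length + 1) l [] [] (by omega)]
  cases hs : splitD d l with
  | nil => exact absurd hs (splitD_ne_nil d l)
  | cons h0 t0 => simp

-- the key identity: joining '0'-runs (one per segment char) with sep reproduces the per-character expansion
theorem join_zeros_splitD (d z : Char) (sep : List Char) (l : List Char) :
    PySem.Chars.join sep ((splitD d l).map (fun seg => List.replicate seg.length z))
      = l.flatMap (fun c => if c = d then sep else [z]) := by
  induction l with
  | nil => simp [splitD, PySem.Chars.join, List.intercalate]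
  | cons c t ih =>
    simp only [splitD]
    by_cases hc : c = d
    · rw [if_pos hc]
      cases hs : splitD d t with
      | nil => exact absurd hs (splitD_ne_nil d t)
      | cons h0 t0 =>
        rw [hs] at ih
        simp only [List.map_cons, PySem.Chars.join, List.intercalate] at ih ⊢
        simp [List.flatMap_cons, hc, ← ih]
    · rw [if_neg hc]
      cases hs : splitD d t with
      | nil => exact absurd hs (splitD_ne_nil d t)
      | cons h0 t0 =>
        rw [hs] at ih
        simp only [List.map_cons, PySem.Chars.join, List.intercalate] at ih ⊢
        simp only [List.length_cons, List.replicate_succ]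
        cases t0 with
        | nil => simp at ih ⊢; simp [hc, ih]
        | cons u v =>
          simp only [List.map_cons, List.intersperse, List.flatten_cons] at ih ⊢
          simp [List.flatMap_cons, hc, ← ih]

-- B's join-of-zero-runs over splitOn, read back as a character-level flatMap
theorem alt_join_toList (sep : String) (s : List Char) :
    (PySem.Str.join sep ((PySem.Chars.splitOn s ['1']).map
        (fun seg => String.ofList (List.replicate seg.length '0')))).toList
      = s.flatMap (fun c => if c = '1' then sep.toList else ['0']) := by
  unfold PySem.Str.join
  rw [splitOn_eq_splitD]
  have : (List.map String.toList
      ((splitD '1' s).map (fun seg => String.ofList (List.replicate seg.length '0'))))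
      = (splitD '1' s).map (fun seg => List.replicate seg.length '0') := by
    simp [List.map_map, Function.comp_def]
  simp only [this, join_zeros_splitD '1' '0' sep.toList s]
  simp

-- ===== VERDICT (by name: the statement is the Claim_ definition above) =====
theorem condAND_spec : Claim_equal_condAND := by
  intro X Y _
  unfold Spec_condAND condAND condAND_alt
  have hinner : (fun (acc : String) (j : Char) => if j = '1' then acc ++ "1" else acc ++ "0")
      = fun (a : String) (j : Char) => a ++ (if j = '1' then "1" else "0") := by
    funext a j; by_cases h : j = '1' <;> simp [h]
  have houter : (fun (outputSTR : String) (i : Char) =>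
      if i = '1' then
        Y.toList.foldl (fun acc j => if j = '1' then acc ++ "1" else acc ++ "0") outputSTR
      else outputSTR ++ "0")
      = fun (a : String) (i : Char) =>
        a ++ (if i = '1' then String.join (Y.toList.map (fun j => if j = '1' then "1" else "0")) else "0") := by
    funext a i
    by_cases h : i = '1'
    · simp only [h, hinner, foldl_app, if_true]
    · simp [h]
  rw [houter, foldl_app]
  apply String.toList_inj.mp
  simp only [String.toList_append, String.toList_empty, List.nil_append]
  rw [alt_join_toList]
  have hY : (PySem.Str.join "1" ((PySem.Chars.splitOn Y.toList ['1']).map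
      (fun seg => String.ofList (List.replicate seg.length '0')))).toList
      = Y.toList.flatMap (fun c => if c = '1' then ['1'] else ['0']) := by
    rw [alt_join_toList]; rfl
  rw [hY]
  simp only [String.toList_join, List.map_map, Function.comp_def]
  rw [← List.flatMap_def]
  apply List.flatMap_congr
  intro c _
  by_cases h : c = '1'
  · simp only [h, if_true, String.toList_join, List.map_map, Function.comp_def]
    rw [← List.flatMap_def]
    apply List.flatMap_congr
    intro j _
    by_cases hj : j = '1' <;> simp [hj]
  · simp [h]
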